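-- pv_equiv track=rewrite | github.com/HuyQuangThai/ChessDQN | Table/MCControl.py | firstVisit
-- ===== SOURCE A (Python) =====
-- def firstVisit(steps):
--     v = {}
--     for s, a in set([(x[0], x[1]) for x in steps]):
--         v[s, a] = []
--         founded = False
--         scores = 0
--
--         for curS, curA, score in steps:
--             if (curS, curA) == (s, a): founded = True
--             if not founded: continue
--             scores += score
--         v[s, a].append(scores)
--
--     return v
-- ===== SOURCE B (Python) =====
-- def firstVisit(steps):
--     # One backward pass builds suffix sums, recording for each pair the sum at
--     # its earliest occurrence (later overwrites win while scanning backwards);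
--     # one forward pass emits each pair once, in first-occurrence order.
--     suffix = {}
--     total = 0
--     for s, a, score in reversed(steps):
--         total += score
--         suffix[s, a] = total
--     v = {}
--     for s, a, _ in steps:
--         if (s, a) not in v:
--             v[s, a] = [suffix[s, a]]
--     return v
-- ===== Notes on version B (the rewrite author's own statement) =====
-- stated objective: faster
-- what changed: Replaces the per-pair rescans of the whole episode (one inner pass over steps for every distinct (state,action) pair) with a single backward suffix-sum pass that records the return at each pair's first occurrence, plus one forward pass to emit each pair once.
import Mathlib
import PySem

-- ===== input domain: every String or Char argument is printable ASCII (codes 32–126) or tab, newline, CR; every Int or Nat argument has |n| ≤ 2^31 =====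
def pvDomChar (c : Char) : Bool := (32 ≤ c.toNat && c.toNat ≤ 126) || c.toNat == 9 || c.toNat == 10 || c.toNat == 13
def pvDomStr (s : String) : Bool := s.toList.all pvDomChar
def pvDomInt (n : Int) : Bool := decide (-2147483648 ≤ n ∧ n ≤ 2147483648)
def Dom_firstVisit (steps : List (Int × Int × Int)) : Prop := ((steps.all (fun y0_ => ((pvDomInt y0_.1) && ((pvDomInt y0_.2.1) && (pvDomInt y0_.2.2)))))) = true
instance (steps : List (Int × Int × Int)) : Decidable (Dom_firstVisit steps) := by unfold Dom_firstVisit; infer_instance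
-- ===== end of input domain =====

-- B replaces A's per-pair rescans of `steps` with one backward suffix-sum pass
-- plus one forward first-occurrence pass; same dict result (key order as ported).


-- ===== PORT A =====
-- Note: A iterates a Python `set` (hash order); the returned dict's key order is not
-- semantically meaningful (dict outputs are compared ignoring order). The port uses
-- PySem.Set.ofList's first-insertion order.
def firstVisit (steps : List (Int × Int × Int)) : List (Int × Int × List Int) :=
  let v := (PySem.Set.ofList (steps.map (fun x => (x.1, x.2.1)))).foldl
    (fun (v : PySem.Dict (Int × Int) (List Int)) p =>
      let v := v.insert p []                       -- v[s, a] = []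
      let st := steps.foldl (fun (st : Bool × Int) x =>
          let founded := if (x.1, x.2.1) = p then true else st.1
          if founded = false then (founded, st.2)  -- continue
          else (founded, st.2 + x.2.2))            -- scores += score
        (false, 0)
      v.insert p (v.getD p [] ++ [st.2]))          -- v[s, a].append(scores)
    PySem.Dict.empty
  v.items.map (fun q => (q.1.1, q.1.2, q.2))

-- ===== PORT B =====
def firstVisit_alt (steps : List (Int × Int × Int)) : List (Int × Int × List Int) :=
  let st := steps.reverse.foldl (fun (st : Int × PySem.Dict (Int × Int) Int) x =>
      let total := st.1 + x.2.2                    -- total += score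
      (total, st.2.insert (x.1, x.2.1) total))     -- suffix[s, a] = total
    (0, PySem.Dict.empty)
  let suffix := st.2
  let v := steps.foldl (fun (v : PySem.Dict (Int × Int) (List Int)) x =>
      if v.contains (x.1, x.2.1) then v
      -- suffix[(s, a)] never misses: the key was inserted by the backward pass,
      -- so getD's default 0 is unreachable; the lookup is exact here
      else v.insert (x.1, x.2.1) [suffix.getD (x.1, x.2.1) 0])
    PySem.Dict.empty
  v.items.map (fun q => (q.1.1, q.1.2, q.2))

-- ===== PRECONDITION & SPEC =====
def Spec_firstVisit (steps : List (Int × Int × Int)) (out : List (Int × Int × List Int)) : Prop := out = firstVisit_alt steps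
instance (steps : List (Int × Int × Int)) (out : List (Int × Int × List Int)) : Decidable (Spec_firstVisit steps out) := by unfold Spec_firstVisit; infer_instance

-- ===== CLAIM (what is proved, stated in full; the proofs are below) =====
def Claim_equal_firstVisit : Prop := ∀ (steps : List (Int × Int × Int)), Dom_firstVisit steps → Spec_firstVisit steps (firstVisit steps)

-- ===== LEMMAS AND PROOFS =====

-- sum of the scores of an episode segment
def pvSumScores (l : List (Int × Int × Int)) : Int := (l.map (fun x => x.2.2)).sum

-- the return from the first occurrence of pair p onward (none if p never occurs)
def pvFirstSuffix (l : List (Int × Int × Int)) (p : Int × Int) : Option Int :=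
  match l with
  | [] => none
  | x :: t => if (x.1, x.2.1) = p then some (x.2.2 + pvSumScores t) else pvFirstSuffix t p

-- A's inner loop once `founded` is true: adds every remaining score
theorem pvInnerA_true (p : Int × Int) (l : List (Int × Int × Int)) : ∀ (acc : Int),
    (l.foldl (fun (st : Bool × Int) x =>
        let founded := if (x.1, x.2.1) = p then true else st.1
        if founded = false then (founded, st.2) else (founded, st.2 + x.2.2))
      (true, acc)) = (true, acc + pvSumScores l) := by
  induction l with
  | nil => intro acc; simp [pvSumScores]
  | cons x t ih =>
    intro acc
    have hstep : (let founded := if (x.1, x.2.1) = p then true else ((true : Bool), acc).1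
        if founded = false then (founded, ((true : Bool), acc).2)
        else (founded, ((true : Bool), acc).2 + x.2.2))
        = ((true : Bool), acc + x.2.2) := by
      by_cases h : (x.1, x.2.1) = p <;> simp [h]
    rw [List.foldl_cons, hstep, ih]
    simp only [pvSumScores, List.map_cons, List.sum_cons, Prod.mk.injEq, true_and]
    omega

-- A's inner loop computes the first-occurrence suffix sum (0 if p never occurs)
theorem pvInnerA_eq (p : Int × Int) (l : List (Int × Int × Int)) :
    (l.foldl (fun (st : Bool × Int) x =>
        let founded := if (x.1, x.2.1) = p then true else st.1
        if founded = false then (founded, st.2) else (founded, st.2 + x.2.2))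
      (false, 0)).2 = (pvFirstSuffix l p).getD 0 := by
  induction l with
  | nil => simp [pvFirstSuffix]
  | cons x t ih =>
    by_cases h : (x.1, x.2.1) = p
    · have hstep : (let founded := if (x.1, x.2.1) = p then true else ((false : Bool), (0 : Int)).1
          if founded = false then (founded, ((false : Bool), (0 : Int)).2)
          else (founded, ((false : Bool), (0 : Int)).2 + x.2.2))
          = ((true : Bool), x.2.2) := by simp [h]
      rw [List.foldl_cons, hstep, pvInnerA_true p t x.2.2]
      simp [pvFirstSuffix, h]
    · have hstep : (let founded := if (x.1, x.2.1) = p then true else ((false : Bool), (0 : Int)).1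
          if founded = false then (founded, ((false : Bool), (0 : Int)).2)
          else (founded, ((false : Bool), (0 : Int)).2 + x.2.2))
          = ((false : Bool), (0 : Int)) := by simp [h]
      rw [List.foldl_cons, hstep, ih]
      simp only [pvFirstSuffix]
      rw [if_neg h]

-- B's backward pass: total is the full sum; the dict maps p to its first-occurrence suffix sum
theorem pvBackward_eq (l : List (Int × Int × Int)) :
    (l.reverse.foldl (fun (st : Int × PySem.Dict (Int × Int) Int) x =>
        let total := st.1 + x.2.2
        (total, st.2.insert (x.1, x.2.1) total))
      (0, PySem.Dict.empty)).1 = pvSumScores l ∧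
    ∀ p, (l.reverse.foldl (fun (st : Int × PySem.Dict (Int × Int) Int) x =>
        let total := st.1 + x.2.2
        (total, st.2.insert (x.1, x.2.1) total))
      (0, PySem.Dict.empty)).2.get? p = pvFirstSuffix l p := by
  induction l with
  | nil => constructor
           · simp [pvSumScores]
           · intro p; simp [pvFirstSuffix, PySem.Dict.get?_empty]
  | cons x t ih =>
    rw [List.reverse_cons, List.foldl_append, List.foldl_cons, List.foldl_nil]
    constructor
    · show (t.reverse.foldl _ (0, PySem.Dict.empty)).1 + x.2.2 = pvSumScores (x :: t)
      rw [ih.1]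
      simp only [pvSumScores, List.map_cons, List.sum_cons]
      omega
    · intro p
      show ((t.reverse.foldl _ (0, PySem.Dict.empty)).2.insert (x.1, x.2.1)
            ((t.reverse.foldl _ (0, PySem.Dict.empty)).1 + x.2.2)).get? p
          = pvFirstSuffix (x :: t) p
      rw [PySem.Dict.get?_insert]
      by_cases h : p = (x.1, x.2.1)
      · rw [if_pos h, ih.1]
        simp only [pvFirstSuffix]
        rw [if_pos h.symm]
        exact congrArg some (by omega)
      · rw [if_neg h]
        simp only [pvFirstSuffix]
        rw [if_neg (fun hc => h hc.symm)]
        exact ih.2 p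

-- first occurrences of keys of l not already in ks, in order
def pvNewKeys (l : List (Int × Int × Int)) (ks : List (Int × Int)) : List (Int × Int) :=
  match l with
  | [] => []
  | x :: t =>
    if (x.1, x.2.1) ∈ ks then pvNewKeys t ks
    else (x.1, x.2.1) :: pvNewKeys t (ks ++ [(x.1, x.2.1)])

theorem pvNewKeys_update (l : List (Int × Int × Int)) : ∀ (ks : List (Int × Int)),
    ks ++ pvNewKeys l ks = PySem.Set.update ks (l.map (fun x => (x.1, x.2.1))) := by
  induction l with
  | nil => intro ks; simp [pvNewKeys, PySem.Set.update]
  | cons x t ih =>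
    intro ks
    simp only [pvNewKeys, List.map_cons, PySem.Set.update, List.foldl_cons]
    by_cases h : (x.1, x.2.1) ∈ ks
    · rw [if_pos h]
      have hadd : PySem.Set.add ks (x.1, x.2.1) = ks := by
        simp [PySem.Set.add, PySem.Set.contains, h]
      rw [hadd]
      exact ih ks
    · rw [if_neg h]
      have hadd : PySem.Set.add ks (x.1, x.2.1) = ks ++ [(x.1, x.2.1)] := by
        simp [PySem.Set.add, PySem.Set.contains, h]
      rw [hadd]
      have := ih (ks ++ [(x.1, x.2.1)])
      simpa [List.append_assoc] using this

-- B's forward loop = a plain insert loop over the fresh first-occurrence keys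
theorem pvForwardB_eq (g : (Int × Int) → List Int)
    (l : List (Int × Int × Int)) : ∀ (d : PySem.Dict (Int × Int) (List Int)),
    l.foldl (fun (v : PySem.Dict (Int × Int) (List Int)) x =>
        if v.contains (x.1, x.2.1) then v
        else v.insert (x.1, x.2.1) (g (x.1, x.2.1))) d
    = (pvNewKeys l d.keys).foldl (fun v p => v.insert p (g p)) d := by
  induction l with
  | nil => intro d; simp [pvNewKeys]
  | cons x t ih =>
    intro d
    rw [List.foldl_cons]
    by_cases h : (x.1, x.2.1) ∈ d.keys
    · rw [if_pos (by rw [PySem.Dict.contains_eq_decide_mem_keys]; simpa using h)]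
      simp only [pvNewKeys]
      rw [if_pos h]
      exact ih d
    · have hc : d.contains (x.1, x.2.1) = false := by
        rw [PySem.Dict.contains_eq_decide_mem_keys]; simpa using h
      rw [if_neg (by rw [hc]; exact Bool.false_ne_true)]
      simp only [pvNewKeys]
      rw [if_neg h, List.foldl_cons, ih]
      congr 1
      rw [PySem.Dict.keys_insert_of_not_contains d _ hc]

-- both ports' dicts have the same items: one entry per distinct pair in
-- first-occurrence order, carrying the first-occurrence suffix sum
theorem pvA_eq (steps : List (Int × Int × Int)) :
    firstVisit steps = ((PySem.Set.ofList (steps.map (fun x => (x.1, x.2.1)))).map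
      (fun p => (p, [(pvFirstSuffix steps p).getD 0]))).map
      (fun q => (q.1.1, q.1.2, q.2)) := by
  unfold firstVisit
  show (List.foldl (fun (v : PySem.Dict (Int × Int) (List Int)) p =>
        (v.insert p []).insert p ((v.insert p []).getD p [] ++
          [(steps.foldl (fun (st : Bool × Int) x =>
              let founded := if (x.1, x.2.1) = p then true else st.1
              if founded = false then (founded, st.2) else (founded, st.2 + x.2.2))
            (false, 0)).2]))
      PySem.Dict.empty
      (PySem.Set.ofList (steps.map (fun x => (x.1, x.2.1))))).items.map
    (fun q => (q.1.1, q.1.2, q.2)) = _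
  rw [PySem.List.foldl_congr_mem
      (PySem.Set.ofList (steps.map (fun x => (x.1, x.2.1))))
      _
      (fun (v : PySem.Dict (Int × Int) (List Int)) p =>
        v.insert p [(pvFirstSuffix steps p).getD 0])
      PySem.Dict.empty
      (by
        intro acc p _
        rw [pvInnerA_eq p steps, PySem.Dict.getD_insert_self,
            PySem.Dict.insert_insert_self, List.nil_append])]
  have hi := PySem.Dict.items_foldl_insert_fresh
      (PySem.Set.ofList (steps.map (fun x => (x.1, x.2.1)))) (fun (p : Int × Int) => p)
      (fun p => [(pvFirstSuffix steps p).getD 0]) PySem.Dict.empty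
      (fun a _ => PySem.Dict.contains_empty a)
      (by simp [PySem.Set.nodup_ofList])
  beta_reduce at hi
  rw [hi]
  simp [PySem.Dict.empty]

theorem pvB_eq (steps : List (Int × Int × Int)) :
    firstVisit_alt steps = ((PySem.Set.ofList (steps.map (fun x => (x.1, x.2.1)))).map
      (fun p => (p, [(pvFirstSuffix steps p).getD 0]))).map
      (fun q => (q.1.1, q.1.2, q.2)) := by
  unfold firstVisit_alt
  show (List.foldl (fun (v : PySem.Dict (Int × Int) (List Int)) x =>
        if v.contains (x.1, x.2.1) then v
        else v.insert (x.1, x.2.1)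
          [((steps.reverse.foldl (fun (st : Int × PySem.Dict (Int × Int) Int) x =>
              let total := st.1 + x.2.2
              (total, st.2.insert (x.1, x.2.1) total)) (0, PySem.Dict.empty)).2).getD
            (x.1, x.2.1) 0])
      PySem.Dict.empty steps).items.map (fun q => (q.1.1, q.1.2, q.2)) = _
  rw [PySem.List.foldl_congr_mem steps _
      (fun (v : PySem.Dict (Int × Int) (List Int)) x =>
        if v.contains (x.1, x.2.1) then v
        else v.insert (x.1, x.2.1) [(pvFirstSuffix steps (x.1, x.2.1)).getD 0])
      PySem.Dict.empty
      (by
        intro acc x _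
        rw [PySem.Dict.getD_eq_get?_getD, (pvBackward_eq steps).2 (x.1, x.2.1)])]
  rw [pvForwardB_eq (fun p => [(pvFirstSuffix steps p).getD 0]) steps PySem.Dict.empty]
  have hnk : pvNewKeys steps (PySem.Dict.empty : PySem.Dict (Int × Int) (List Int)).keys
      = PySem.Set.ofList (steps.map (fun x => (x.1, x.2.1))) := by
    have h := pvNewKeys_update steps (PySem.Dict.empty : PySem.Dict (Int × Int) (List Int)).keys
    rw [PySem.Dict.keys_empty] at h
    simpa using h
  rw [hnk]
  have hi := PySem.Dict.items_foldl_insert_fresh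
      (PySem.Set.ofList (steps.map (fun x => (x.1, x.2.1)))) (fun (p : Int × Int) => p)
      (fun p => [(pvFirstSuffix steps p).getD 0]) PySem.Dict.empty
      (fun a _ => PySem.Dict.contains_empty a)
      (by simp [PySem.Set.nodup_ofList])
  beta_reduce at hi
  rw [hi]
  simp [PySem.Dict.empty]

-- ===== VERDICT (by name: the statement is the Claim_ definition above) =====
theorem firstVisit_spec : Claim_equal_firstVisit := by
  intro steps _
  unfold Spec_firstVisit
  rw [pvA_eq, pvB_eq]
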